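-- pv_equiv track=rewrite | github.com/py-cov-action/python-coverage-comment-action | coverage_comment/groups.py | compute_contiguous_groups
-- ===== SOURCE A (Python) =====
-- import functools
-- import itertools
--
-- def compute_contiguous_groups(
--     values: list[int], separators: set[int], joiners: set[int], max_gap: int
-- ) -> list[tuple[int, int]]:
--     """
--     Given a list of (sorted) values, a list of separators and a list of
--     joiners, return a list of ranges (start, included end) describing groups of
--     values.
--
--     Groups are created by joining contiguous values together, and in some cases
--     by merging groups, enclosing a gap of values between them. Gaps that may be
--     enclosed are small gaps (<= max_gap values after removing all joiners)
--     where no line is a "separator"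
--     """
--     contiguous_groups: list[tuple[int, int]] = []
--     for _, contiguous_group in itertools.groupby(
--         zip(values, itertools.count(1)), lambda x: x[1] - x[0]
--     ):
--         grouped_values = (e[0] for e in contiguous_group)
--         first = next(grouped_values)
--         try:
--             *_, last = grouped_values
--         except ValueError:
--             last = first
--         contiguous_groups.append((first, last))
--
--     def reducer(
--         acc: list[tuple[int, int]], group: tuple[int, int]
--     ) -> list[tuple[int, int]]:
--         if not acc:
--             return [group]
--
--         last_group = acc[-1]
--         last_start, last_end = last_group
--         next_start, next_end = group
--
--         gap = set(range(last_end + 1, next_start)) - joiners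
--
--         gap_is_small = len(gap) <= max_gap
--         gap_contains_separators = gap & separators
--
--         if gap_is_small and not gap_contains_separators:
--             acc[-1] = (last_start, next_end)
--             return acc
--
--         acc.append(group)
--         return acc
--
--     return functools.reduce(reducer, contiguous_groups, [])
-- ===== SOURCE B (Python) =====
-- def compute_contiguous_groups(
--     values: list[int], separators: set[int], joiners: set[int], max_gap: int
-- ) -> list[tuple[int, int]]:
--     """One fused pass over values: runs are grown and merged on the fly; the
--     gap between groups is never materialised -- its size is computed
--     arithmetically from the interval bounds and a count over the joiners."""
--     jset = set(joiners)
--     sset = set(separators)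
--     result: list[tuple[int, int]] = []
--     for v in values:
--         if not result:
--             result.append((v, v))
--             continue
--         start, end = result[-1]
--         if v == end + 1:
--             result[-1] = (start, v)
--             continue
--         lo, hi = end + 1, v
--         if lo < hi:
--             blocked = any(lo <= s < hi and s not in jset for s in sset)
--             gap_size = (hi - lo) - sum(1 for j in jset if lo <= j < hi)
--         else:
--             blocked = False
--             gap_size = 0
--         if gap_size <= max_gap and not blocked:
--             result[-1] = (start, v)
--         else:
--             result.append((v, v))
--     return result
-- ===== Notes on version B (the rewrite author's own statement) =====
-- stated objective: faster
-- what changed: B replaces A's two-phase groupby-then-reduce, which materialises every gap as set(range(...)), by a single fused pass over the values that decides each merge arithmetically: gap size = interval width minus a count of joiners inside it, separators checked by a membership scan.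
import Mathlib
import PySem

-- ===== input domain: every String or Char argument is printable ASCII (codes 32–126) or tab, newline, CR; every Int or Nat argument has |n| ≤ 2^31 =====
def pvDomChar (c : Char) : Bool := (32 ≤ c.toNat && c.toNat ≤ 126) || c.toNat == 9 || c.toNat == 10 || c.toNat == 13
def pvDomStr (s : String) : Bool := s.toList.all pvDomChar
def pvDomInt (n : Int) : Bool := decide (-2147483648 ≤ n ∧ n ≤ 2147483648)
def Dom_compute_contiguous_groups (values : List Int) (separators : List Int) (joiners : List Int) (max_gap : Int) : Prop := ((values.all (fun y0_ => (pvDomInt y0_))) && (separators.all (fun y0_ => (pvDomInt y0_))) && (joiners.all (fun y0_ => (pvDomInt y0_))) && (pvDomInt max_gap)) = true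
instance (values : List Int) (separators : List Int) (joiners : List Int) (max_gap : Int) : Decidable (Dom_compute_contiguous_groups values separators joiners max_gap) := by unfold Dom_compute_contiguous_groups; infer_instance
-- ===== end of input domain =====

-- B replaces A's two-phase groupby+reduce by one fused pass that never
-- materialises the gap as a set: gap size comes from interval arithmetic plus
-- a count over the joiners, the separator test from a membership scan.

-- ===== PORT A =====
-- zip(values, itertools.count(1))
def pvZipCount : List Int → Int → List (Int × Int)
  | [], _ => []
  | v :: rest, i => (v, i) :: pvZipCount rest (i + 1)

-- itertools.groupby(..., key = lambda x: x[1] - x[0]) followed by the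
-- first/last extraction of each group, producing the (first, last) pairs.
mutual
def pvGroupby : List (Int × Int) → List (Int × Int)
  | [] => []
  | (v, i) :: rest => pvGroupRun v v (i - v) rest
termination_by xs => (xs.length, 0)
def pvGroupRun (first last key : Int) : List (Int × Int) → List (Int × Int)
  | [] => [(first, last)]
  | (v, i) :: rest =>
      if i - v = key then pvGroupRun first v key rest
      else (first, last) :: pvGroupby ((v, i) :: rest)
termination_by xs => (xs.length, 1)
end

-- the inner 'reducer' closure
def pvReducer (separators joiners : List Int) (max_gap : Int)
    (acc : List (Int × Int)) (group : Int × Int) : List (Int × Int) :=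
  match acc.getLast? with
  | none => [group]
  | some (last_start, last_end) =>
      let next_start := group.1
      let next_end := group.2
      let gap : PySem.Set Int :=
        PySem.Set.diff (PySem.Set.ofList (PySem.List.pyRange (last_end + 1) next_start 1)) joiners
      let gap_is_small : Prop := (gap.length : Int) ≤ max_gap
      let gap_contains_separators : PySem.Set Int := PySem.Set.inter gap separators
      if gap_is_small ∧ gap_contains_separators = [] then
        acc.dropLast ++ [(last_start, next_end)]
      else
        acc ++ [group]

def compute_contiguous_groups (values : List Int) (separators : List Int) (joiners : List Int) (max_gap : Int) : List (Int × Int) :=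
  (pvGroupby (pvZipCount values 1)).foldl (pvReducer separators joiners max_gap) []

-- ===== PORT B =====
def pvStepB (sset jset : List Int) (max_gap : Int)
    (result : List (Int × Int)) (v : Int) : List (Int × Int) :=
  match result.getLast? with
  | none => result ++ [(v, v)]
  | some (start, e) =>
      if v = e + 1 then result.dropLast ++ [(start, v)]
      else
        let lo := e + 1
        let hi := v
        let bg : Bool × Int :=
          if lo < hi then
            (sset.any (fun s => decide (lo ≤ s) && decide (s < hi) && !(jset.contains s)),
             (hi - lo) - (jset.countP (fun j => decide (lo ≤ j) && decide (j < hi)) : Int))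
          else (false, 0)
        if bg.2 ≤ max_gap ∧ bg.1 = false then result.dropLast ++ [(start, v)]
        else result ++ [(v, v)]

def compute_contiguous_groups_alt (values : List Int) (separators : List Int) (joiners : List Int) (max_gap : Int) : List (Int × Int) :=
  let jset : PySem.Set Int := PySem.Set.ofList joiners
  let sset : PySem.Set Int := PySem.Set.ofList separators
  values.foldl (pvStepB sset jset max_gap) []

-- ===== PRECONDITION & SPEC =====
def Spec_compute_contiguous_groups (values : List Int) (separators : List Int) (joiners : List Int) (max_gap : Int) (out : List (Int × Int)) : Prop := out = compute_contiguous_groups_alt values separators joiners max_gap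
instance (values : List Int) (separators : List Int) (joiners : List Int) (max_gap : Int) (out : List (Int × Int)) : Decidable (Spec_compute_contiguous_groups values separators joiners max_gap out) := by unfold Spec_compute_contiguous_groups; infer_instance

-- ===== CLAIM (what is proved, stated in full; the proofs are below) =====
def Claim_equal_compute_contiguous_groups : Prop := ∀ (values : List Int) (separators : List Int) (joiners : List Int) (max_gap : Int), Dom_compute_contiguous_groups values separators joiners max_gap → Spec_compute_contiguous_groups values separators joiners max_gap (compute_contiguous_groups values separators joiners max_gap)

-- ===== LEMMAS AND PROOFS =====

-- |{x : lo ≤ x < hi, x ∉ joiners}| computed by counting the joiners inside the interval.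
theorem pv_count (joiners : List Int) (lo hi : Int) (hlt : lo < hi) :
    ((PySem.Set.diff (PySem.Set.ofList (PySem.List.pyRange lo hi 1)) joiners).length : Int)
      = (hi - lo) - ((PySem.Set.ofList joiners).countP (fun j => decide (lo ≤ j) && decide (j < hi)) : Int) := by
  set R := PySem.List.pyRange lo hi 1 with hR
  set gap := PySem.Set.diff (PySem.Set.ofList R) joiners with hgap
  set Jr := (PySem.Set.ofList joiners).filter (fun j => decide (lo ≤ j) && decide (j < hi)) with hJr
  have hcount : (PySem.Set.ofList joiners).countP (fun j => decide (lo ≤ j) && decide (j < hi)) = Jr.length := by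
    rw [hJr, List.countP_eq_length_filter]
  have hnR : R.Nodup := PySem.List.nodup_pyRange_one lo hi
  have hngap : gap.Nodup := PySem.Set.nodup_diff _ joiners (PySem.Set.nodup_ofList R)
  have hnJr : Jr.Nodup := List.Nodup.filter _ (PySem.Set.nodup_ofList joiners)
  have hmemgap : ∀ x : Int, x ∈ gap ↔ (lo ≤ x ∧ x < hi) ∧ x ∉ joiners := by
    intro x
    rw [hgap]
    simp [PySem.Set.mem_diff, PySem.Set.mem_ofList, hR, PySem.List.mem_pyRange_one]
  have hmemJr : ∀ x : Int, x ∈ Jr ↔ x ∈ joiners ∧ (lo ≤ x ∧ x < hi) := by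
    intro x
    rw [hJr]
    simp [List.mem_filter, PySem.Set.mem_ofList, and_comm]
  have hdisj : gap.Disjoint Jr := by
    intro x hx hx'
    exact ((hmemgap x).mp hx).2 ((hmemJr x).mp hx').1
  have hnapp : (gap ++ Jr).Nodup := List.Nodup.append hngap hnJr hdisj
  have hperm : (gap ++ Jr).Perm R := by
    rw [List.perm_ext_iff_of_nodup hnapp hnR]
    intro x
    rw [List.mem_append, hmemgap, hmemJr, hR, PySem.List.mem_pyRange_one]
    tauto
  have hlen : gap.length + Jr.length = (hi - lo).toNat := by
    have := hperm.length_eq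
    rw [List.length_append] at this
    rw [this, hR, PySem.List.length_pyRange_one]
  have hnn : (0:Int) ≤ hi - lo := by omega
  rw [hcount]
  omega

-- A's separator test agrees with B's membership scan.
theorem pv_sep (separators joiners : List Int) (lo hi : Int) :
    (PySem.Set.inter (PySem.Set.diff (PySem.Set.ofList (PySem.List.pyRange lo hi 1)) joiners) separators = []) ↔
    ((PySem.Set.ofList separators).any (fun s => decide (lo ≤ s) && decide (s < hi) && !((PySem.Set.ofList joiners).contains s)) = false) := by
  rw [List.eq_nil_iff_forall_not_mem, List.any_eq_false]
  simp only [PySem.Set.mem_inter, PySem.Set.mem_diff, PySem.Set.mem_ofList,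
    PySem.List.mem_pyRange_one, Bool.and_eq_true, decide_eq_true_eq, Bool.not_eq_true',
    PySem.Set.contains_eq_listContains, List.contains_eq_mem, decide_eq_true_eq]
  constructor
  · intro h x hx hc
    exact h x ⟨⟨hc.1, by simpa using hc.2⟩, hx⟩
  · intro h x hc
    exact h x hc.2 ⟨hc.1.1, by simpa using hc.1.2⟩

-- The merge condition of A and of B, as used at a boundary with gap (lo, hi) = (e+1, v).
theorem pv_cond_eq (separators joiners : List Int) (max_gap lo hi : Int) :
    (((PySem.Set.diff (PySem.Set.ofList (PySem.List.pyRange lo hi 1)) joiners).length : Int) ≤ max_gap ∧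
      PySem.Set.inter (PySem.Set.diff (PySem.Set.ofList (PySem.List.pyRange lo hi 1)) joiners) separators = []) ↔
    ((if lo < hi then
        ((PySem.Set.ofList separators).any (fun s => decide (lo ≤ s) && decide (s < hi) && !((PySem.Set.ofList joiners).contains s)),
         (hi - lo) - ((PySem.Set.ofList joiners).countP (fun j => decide (lo ≤ j) && decide (j < hi)) : Int))
      else ((false : Bool), (0 : Int))).2 ≤ max_gap ∧
     (if lo < hi then
        ((PySem.Set.ofList separators).any (fun s => decide (lo ≤ s) && decide (s < hi) && !((PySem.Set.ofList joiners).contains s)),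
         (hi - lo) - ((PySem.Set.ofList joiners).countP (fun j => decide (lo ≤ j) && decide (j < hi)) : Int))
      else ((false : Bool), (0 : Int))).1 = false) := by
  by_cases h : lo < hi
  · simp only [if_pos h]
    rw [pv_count joiners lo hi h, pv_sep]
  · have hnil : PySem.List.pyRange lo hi 1 = [] := PySem.List.pyRange_one_eq_nil (by omega)
    have hdiff : PySem.Set.diff (PySem.Set.ofList (PySem.List.pyRange lo hi 1)) joiners = [] := by
      rw [hnil]
      exact List.eq_nil_iff_forall_not_mem.mpr (fun x hx => by
        rw [PySem.Set.mem_diff] at hx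
        simp [PySem.Set.ofList] at hx)
    have hinter : PySem.Set.inter ([] : PySem.Set Int) separators = [] := by
      exact List.eq_nil_iff_forall_not_mem.mpr (fun x hx => by
        rw [PySem.Set.mem_inter] at hx
        simp at hx)
    simp only [if_neg h, hdiff, hinter]
    simp

-- Every result of pvReducer ends with a pair whose second component is the group's end.
theorem pvReducer_getLast (separators joiners : List Int) (max_gap : Int)
    (acc : List (Int × Int)) (g : Int × Int) :
    ∃ s, (pvReducer separators joiners max_gap acc g).getLast? = some (s, g.2) := by
  obtain ⟨g1, g2⟩ := g
  cases hacc : acc.getLast? with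
  | none => exact ⟨g1, by simp [pvReducer, hacc]⟩
  | some p =>
      obtain ⟨ls, le⟩ := p
      simp only [pvReducer, hacc]
      split_ifs with hC
      · exact ⟨ls, by simp⟩
      · exact ⟨g1, by simp⟩

-- Step/merge commutation on a contiguous value.
theorem pv_SM1 (separators joiners : List Int) (max_gap : Int)
    (acc : List (Int × Int)) (f l : Int) :
    pvStepB (PySem.Set.ofList separators) (PySem.Set.ofList joiners) max_gap
      (pvReducer separators joiners max_gap acc (f, l)) (l + 1)
      = pvReducer separators joiners max_gap acc (f, l + 1) := by
  cases hacc : acc.getLast? with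
  | none =>
      have hnil : acc = [] := List.getLast?_eq_none_iff.mp hacc
      subst hnil
      simp [pvReducer, pvStepB]
  | some p =>
      obtain ⟨ls, le⟩ := p
      simp only [pvReducer, hacc]
      split_ifs with hC
      · simp [pvStepB]
      · simp [pvStepB]

-- Step/merge commutation at a run boundary.
theorem pv_SM2 (separators joiners : List Int) (max_gap : Int)
    (b : List (Int × Int)) (s l v : Int) (hlast : b.getLast? = some (s, l)) (hv : v ≠ l + 1) :
    pvStepB (PySem.Set.ofList separators) (PySem.Set.ofList joiners) max_gap b v
      = pvReducer separators joiners max_gap b (v, v) := by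
  simp only [pvStepB, pvReducer, hlast, if_neg hv]
  exact if_congr (pv_cond_eq separators joiners max_gap (l + 1) v).symm rfl rfl

theorem pv_main (separators joiners : List Int) (max_gap : Int) :
    ∀ (vs : List Int) (f l i : Int) (acc : List (Int × Int)),
    List.foldl (pvStepB (PySem.Set.ofList separators) (PySem.Set.ofList joiners) max_gap)
        (pvReducer separators joiners max_gap acc (f, l)) vs
      = List.foldl (pvReducer separators joiners max_gap) acc
          (pvGroupRun f l (i - l) (pvZipCount vs (i + 1))) := by
  intro vs
  induction vs with
  | nil =>
      intro f l i acc
      simp [pvZipCount, pvGroupRun]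
  | cons v vs ih =>
      intro f l i acc
      by_cases hv : v = l + 1
      · subst hv
        have hkey : i + 1 - (l + 1) = i - l := by ring
        simp only [pvZipCount, List.foldl_cons]
        rw [pv_SM1]
        simp only [pvGroupRun]
        rw [if_pos hkey, ← hkey]
        exact ih f (l + 1) (i + 1) acc
      · obtain ⟨s0, hlast⟩ := pvReducer_getLast separators joiners max_gap acc (f, l)
        simp only [pvZipCount, List.foldl_cons]
        rw [pv_SM2 separators joiners max_gap _ s0 l v hlast hv]
        simp only [pvGroupRun]
        rw [if_neg (by omega : ¬(i + 1 - v = i - l))]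
        simp only [List.foldl_cons, pvGroupby]
        exact ih v v (i + 1) (pvReducer separators joiners max_gap acc (f, l))

-- ===== VERDICT (by name: the statement is the Claim_ definition above) =====
theorem compute_contiguous_groups_spec : Claim_equal_compute_contiguous_groups := by
  intro values separators joiners max_gap _
  unfold Spec_compute_contiguous_groups
  cases values with
  | nil => simp [compute_contiguous_groups, compute_contiguous_groups_alt, pvZipCount, pvGroupby]
  | cons v vs =>
      have h := pv_main separators joiners max_gap vs v v 1 []
      show (pvGroupby (pvZipCount (v :: vs) 1)).foldl (pvReducer separators joiners max_gap) []
        = _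
      simp only [pvZipCount, pvGroupby]
      rw [← h]
      rfl
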